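-- pv_equiv track=rewrite | github.com/wangdage1949/WIF500_Lottery | main.py | generate_candidates_safe
-- ===== SOURCE A (Python) =====
-- ALPHABET = "123456789ABCDEFGHJKLMNPQRSTUVWXYZabcdefghijkmnopqrstuvwxyz"
--
-- def generate_candidates_safe(template: str, index_cand_map: dict):
--     chars = list(template)
--     length = len(chars)
--
--     positions = []
--     for idx in range(length):
--         if idx in index_cand_map:
--             allowed = [c for c in index_cand_map[idx] if c in ALPHABET]
--             positions.append((idx, allowed))
--         else:
--             positions.append((idx, [chars[idx]]))
--
--     def generate_combinations(pos_index, current):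
--         if pos_index == len(positions):
--             yield "".join(current)
--             return
--         idx, choices = positions[pos_index]
--         for choice in choices:
--             current[idx] = choice
--             yield from generate_combinations(pos_index + 1, current)
--
--     current = [None] * length
--     yield from generate_combinations(0, current)
-- ===== SOURCE B (Python) =====
-- ALPHABET = "123456789ABCDEFGHJKLMNPQRSTUVWXYZabcdefghijkmnopqrstuvwxyz"
--
-- def generate_candidates_safe(template: str, index_cand_map: dict):
--     # Iterative prefix-product: build per-position choice lists, then extend
--     # every partial result by each choice, one position at a time.
--     choice_lists = []
--     for idx, ch in enumerate(template):
--         if idx in index_cand_map: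
--             choice_lists.append([c for c in index_cand_map[idx] if c in ALPHABET])
--         else:
--             choice_lists.append([ch])
--     results = [""]
--     for choices in choice_lists:
--         results = [prefix + c for prefix in results for c in choices]
--     yield from results
-- ===== Notes on version B (the rewrite author's own statement) =====
-- stated objective: alternative
-- what changed: Replaces the recursive generator that backtracks over a pre-filled mutable slot array (current[idx] = choice, then recurse) with an iterative prefix-product: build the per-position choice lists, then repeatedly extend every partial result string by each choice of the next position.
import Mathlib
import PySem

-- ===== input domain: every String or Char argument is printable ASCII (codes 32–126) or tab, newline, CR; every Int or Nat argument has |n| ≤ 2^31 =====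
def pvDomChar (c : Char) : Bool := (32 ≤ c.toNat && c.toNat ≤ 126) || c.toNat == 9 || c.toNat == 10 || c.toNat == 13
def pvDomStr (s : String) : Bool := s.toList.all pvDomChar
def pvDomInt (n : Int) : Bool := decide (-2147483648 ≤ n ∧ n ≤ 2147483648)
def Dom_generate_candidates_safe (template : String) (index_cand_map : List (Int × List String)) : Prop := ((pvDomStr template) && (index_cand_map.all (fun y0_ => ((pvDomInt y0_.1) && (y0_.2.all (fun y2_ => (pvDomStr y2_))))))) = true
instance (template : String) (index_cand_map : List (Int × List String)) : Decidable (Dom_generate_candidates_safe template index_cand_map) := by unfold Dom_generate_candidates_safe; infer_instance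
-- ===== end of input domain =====

-- B replaces A's recursive generator over a mutable slot array by an iterative
-- prefix-product over the choice lists (objective: alternative; same output, same order).

def pvAlphabet : String := "123456789ABCDEFGHJKLMNPQRSTUVWXYZabcdefghijkmnopqrstuvwxyz"

-- ===== PORT A =====
-- generate_combinations(pos_index, current): recursion over the remaining suffix of
-- `positions`; `current[idx] = choice` is a functional list set (the Python mutation is
-- only ever observed through the later sets/joins on the same path, so this is exact).
-- Python inits `current = [None] * length`; we use "" placeholders — exact, since every
-- index 0..length-1 is assigned before the only `"".join(current)`.
def pvA_rec : List (Int × List String) → List String → List String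
  | [], current => [PySem.Str.join "" current]
  | (idx, choices) :: rest, current =>
      choices.foldl (fun acc choice => acc ++ pvA_rec rest (current.set idx.toNat choice)) []

def generate_candidates_safe (template : String) (index_cand_map : List (Int × List String)) : List String :=
  let chars := template.toList.map (fun c => String.mk [c])   -- list(template): 1-char strings
  let length := chars.length
  let positions := (PySem.List.pyRange 0 length 1).map (fun idx =>
    match index_cand_map.lookup idx with                       -- idx in dict / dict[idx] (first match)
    | some cands => (idx, cands.filter (fun c => PySem.Str.isIn c pvAlphabet))  -- 'c in ALPHABET' is a substring test
    | none => (idx, [PySem.List.pyGetD chars idx ""]))         -- chars[idx], idx always in range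
  pvA_rec positions (List.replicate length "")

-- ===== PORT B =====
def generate_candidates_safe_alt (template : String) (index_cand_map : List (Int × List String)) : List String :=
  let choice_lists := (PySem.List.enumerate (template.toList.map (fun c => String.mk [c])) 0).map
    (fun p => match index_cand_map.lookup p.1 with
      | some cands => cands.filter (fun c => PySem.Str.isIn c pvAlphabet)
      | none => [p.2])
  choice_lists.foldl (fun results choices => results.flatMap (fun pfx => choices.map (fun c => pfx ++ c))) [""]

-- ===== PRECONDITION & SPEC =====
def Spec_generate_candidates_safe (template : String) (index_cand_map : List (Int × List String)) (out : List String) : Prop := out = generate_candidates_safe_alt template index_cand_map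
instance (template : String) (index_cand_map : List (Int × List String)) (out : List String) : Decidable (Spec_generate_candidates_safe template index_cand_map out) := by unfold Spec_generate_candidates_safe; infer_instance

-- ===== CLAIM (what is proved, stated in full; the proofs are below) =====
def Claim_equal_generate_candidates_safe : Prop := ∀ (template : String) (index_cand_map : List (Int × List String)), Dom_generate_candidates_safe template index_cand_map → Spec_generate_candidates_safe template index_cand_map (generate_candidates_safe template index_cand_map)

-- ===== LEMMAS AND PROOFS =====

-- the Cartesian product of the choice lists, prefix-major order
def pvProd : List (List String) → List (List String)
  | [] => [[]]
  | cs :: rest => cs.flatMap (fun c => (pvProd rest).map (c :: ·))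

theorem pv_join_empty_cons (c : String) (l : List String) :
    PySem.Str.join "" (c :: l) = c ++ PySem.Str.join "" l := by
  apply String.ext
  show (PySem.Str.join "" (c :: l)).toList = _
  rw [PySem.Str.toList_join]
  cases l with
  | nil => simp [PySem.Chars.join, List.intercalate, PySem.Str.toList_join]
  | cons d t => simp [PySem.Chars.join, List.intercalate, PySem.Str.toList_join]

theorem pv_take_set (l : List String) (k : Nat) (c : String) (h : k < l.length) :
    (l.set k c).take (k + 1) = l.take k ++ [c] := by
  apply List.ext_getElem
  · simp; omega
  · intro i h1 h2
    simp at h1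
    rcases Nat.lt_or_ge i k with hi | hi
    · simp [List.getElem_take, Nat.ne_of_gt hi, List.getElem_append]
      omega
    · have : i = k := by omega
      subst this
      simp [List.getElem_take]

-- characterisation of A's recursion: positions k.. paired with choice lists cls
theorem pv_recA (cls : List (List String)) (k : Nat) (current : List String)
    (h : k + cls.length = current.length) :
    pvA_rec (PySem.List.enumerate cls (k : Int)) current
      = (pvProd cls).map (fun combo => PySem.Str.join "" (current.take k ++ combo)) := by
  induction cls generalizing k current with
  | nil =>
    simp at h
    simp [PySem.List.enumerate, pvA_rec, pvProd, h]
  | cons cs rest ih =>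
    rw [PySem.List.enumerate_cons]
    show (cs.foldl (fun acc choice => acc ++ pvA_rec (PySem.List.enumerate rest ((k:Int)+1)) (current.set (k:Int).toNat choice)) [])
      = _
    rw [PySem.List.foldl_append_eq_flatMap]
    have hk : k < current.length := by simp at h; omega
    have hstep : ∀ c, pvA_rec (PySem.List.enumerate rest ((k:Int)+1)) (current.set (k:Int).toNat c)
        = (pvProd rest).map (fun combo => PySem.Str.join "" (current.take k ++ (c :: combo))) := by
      intro c
      have hcast : ((k:Int)+1) = ((k+1 : Nat) : Int) := by push_cast; ring
      rw [hcast, ih (k+1) (current.set (k:Int).toNat c) (by simp at h ⊢; omega)]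
      simp only [Int.toNat_natCast]
      rw [pv_take_set current k c hk]
      simp
    simp only [hstep, pvProd, List.nil_append]
    rw [List.map_flatMap]
    congr 1
    funext c
    rw [List.map_map]
    rfl

-- characterisation of B's fold: iterative prefix product
theorem pv_recB (cls : List (List String)) (results : List String) :
    cls.foldl (fun results choices => results.flatMap (fun pfx => choices.map (fun c => pfx ++ c))) results
      = results.flatMap (fun p => (pvProd cls).map (fun combo => p ++ PySem.Str.join "" combo)) := by
  induction cls generalizing results with
  | nil =>
    have hjoin : PySem.Str.join "" ([] : List String) = "" := by decide
    simp [pvProd, hjoin]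
  | cons cs rest ih =>
    rw [List.foldl_cons, ih]
    rw [List.flatMap_assoc]
    show _ = results.flatMap (fun p => (pvProd (cs :: rest)).map _)
    simp only [pvProd]
    congr 1
    funext p
    rw [List.map_flatMap, List.flatMap_map]
    congr 1
    funext c
    rw [List.map_map]
    congr 1
    funext combo
    simp [pv_join_empty_cons, String.append_assoc]

theorem pv_enum_map_enum {α β : Type} (l : List α) (f : (Int × α) → β) (s : Int) :
    PySem.List.enumerate ((PySem.List.enumerate l s).map f) s
      = (PySem.List.enumerate l s).map (fun p => (p.1, f p)) := by
  induction l generalizing s with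
  | nil => simp [PySem.List.enumerate]
  | cons x t ih =>
    rw [PySem.List.enumerate_cons, List.map_cons, PySem.List.enumerate_cons, List.map_cons]
    rw [ih (s+1)]

-- both ports build the same list of per-position choice lists
theorem pv_positions_eq (template : String) (index_cand_map : List (Int × List String)) :
    (PySem.List.pyRange 0 ((template.toList.map (fun c => String.mk [c])).length) 1).map (fun idx =>
      match index_cand_map.lookup idx with
      | some cands => (idx, cands.filter (fun c => PySem.Str.isIn c pvAlphabet))
      | none => (idx, [PySem.List.pyGetD (template.toList.map (fun c => String.mk [c])) idx ""]))
    = PySem.List.enumerate ((PySem.List.enumerate (template.toList.map (fun c => String.mk [c])) 0).map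
        (fun p => match index_cand_map.lookup p.1 with
          | some cands => cands.filter (fun c => PySem.Str.isIn c pvAlphabet)
          | none => [p.2])) 0 := by
  set chars := template.toList.map (fun c => String.mk [c]) with hchars
  rw [pv_enum_map_enum]
  rw [PySem.List.enumerate_eq_map_pyRange (d := "")]
  rw [List.map_map]
  simp only [PySem.List.len_eq]
  apply List.map_congr_left
  intro j hj
  cases h : index_cand_map.lookup j <;> simp [h]

-- ===== VERDICT (by name: the statement is the Claim_ definition above) =====
theorem generate_candidates_safe_spec : Claim_equal_generate_candidates_safe := by
  intro template index_cand_map _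
  show generate_candidates_safe template index_cand_map = generate_candidates_safe_alt template index_cand_map
  unfold generate_candidates_safe generate_candidates_safe_alt
  simp only []
  rw [pv_positions_eq]
  rw [show (0 : Int) = ((0 : Nat) : Int) from rfl, pv_recA _ 0 _ (by simp [PySem.List.length_enumerate])]
  rw [pv_recB]
  simp
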